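-- pv_equiv track=rewrite | github.com/RGZ1890/codetree-TILs | 241110/십자 모양의 지속적 폭발/cross-shape-continuous-bomb.py | explode
-- ===== SOURCE A (Python) =====
-- directions = [[-1, 0], [0, 1], [1, 0], [0, -1]]
--
-- def realign(board, n):
-- 	for j in range(n):
-- 		for i in range(n - 2, -1, -1):
-- 			if board[i + 1][j] == 0:
-- 				board[i][j], board[i + 1][j] = board[i + 1][j], board[i][j]
--
-- 	return board
--
-- def explode(board, n, start):
-- 	dist = board[start[0]][start[1]]
-- 	board[start[0]][start[1]] = 0
-- 	for i in range(4):
-- 		d = directions[i]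
-- 		for j in range(1, dist):
-- 			pos = [start[0] + d[0] * j, start[1] + d[1] * j]
-- 			if 0 <= pos[0] < n and 0 <= pos[1] < n:
-- 				board[pos[0]][pos[1]] = 0
-- 			else:
-- 				break
--
-- 	return realign(board, n)
-- ===== SOURCE B (Python) =====
-- def explode(board, n, start):
--     dist = board[start[0]][start[1]]
--     board[start[0]][start[1]] = 0
--     for d0, d1 in ((-1, 0), (0, 1), (1, 0), (0, -1)):
--         x, y, step = start[0] + d0, start[1] + d1, 1
--         while step < dist and 0 <= x < n and 0 <= y < n:
--             board[x][y] = 0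
--             x, y, step = x + d0, y + d1, step + 1
--     for j in range(n):
--         col = [board[i][j] for i in range(n)]
--         k = -1
--         for i in range(n):
--             if col[i] == 0:
--                 k = max(k, i)
--         if k >= 0:
--             new = [0] + col[:k] + col[k + 1:]
--             for i in range(n):
--                 board[i][j] = new[i]
--     return board
-- ===== Notes on version B (the rewrite author's own statement) =====
-- stated objective: alternative
-- what changed: The cross is zeroed by incrementally advancing a (x,y) cursor in a while loop per direction instead of recomputing start+d*j each step, and realign's repeated adjacent-swap bubble pass per column is replaced by extracting the column, finding the lowest zero index with a max accumulator, and writing back the rebuilt column [0]+col[:k]+col[k+1:].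
-- outside the precondition, e.g. on explode([[1], [1, 2]], 2, [0, 0]): A returns [[0], [1, 2]], B raises IndexError
import Mathlib
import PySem

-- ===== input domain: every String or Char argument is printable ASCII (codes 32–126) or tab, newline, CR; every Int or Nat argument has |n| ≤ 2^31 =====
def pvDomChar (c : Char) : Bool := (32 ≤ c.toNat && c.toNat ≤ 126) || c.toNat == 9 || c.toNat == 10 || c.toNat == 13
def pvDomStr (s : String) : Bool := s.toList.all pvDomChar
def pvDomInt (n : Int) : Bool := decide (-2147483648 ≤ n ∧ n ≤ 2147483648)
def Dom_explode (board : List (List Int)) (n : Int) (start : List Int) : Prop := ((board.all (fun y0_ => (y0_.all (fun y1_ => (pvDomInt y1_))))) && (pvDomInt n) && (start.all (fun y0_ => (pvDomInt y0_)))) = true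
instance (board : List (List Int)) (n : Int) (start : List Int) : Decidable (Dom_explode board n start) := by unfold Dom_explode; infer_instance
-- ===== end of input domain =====

-- B zeroes the cross with an advancing-cursor while loop per direction and replaces realign's
-- adjacent-swap bubble pass per column by extract-column / find-lowest-zero / write-back of the
-- rebuilt column; both Pythons mutate `board` in place and return it — the theorems here are
-- about the returned value (which is the final state of the board).

-- ===== PORT A =====
-- board[i][j] read/write with nonnegative indices (as produced by Python's range loops)
def getCell (b : List (List Int)) (i j : Nat) : Int := (b.getD i []).getD j 0
def setCell (b : List (List Int)) (i j : Nat) (v : Int) : List (List Int) :=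
  b.set i ((b.getD i []).set j v)
-- board[x][y] read/write with a possibly negative Python index (start[0]/start[1])
def getI (b : List (List Int)) (x y : Int) : Int :=
  PySem.List.pyGetD (PySem.List.pyGetD b x []) y 0
def setI (b : List (List Int)) (x y : Int) (v : Int) : List (List Int) :=
  PySem.List.pySetD b x (PySem.List.pySetD (PySem.List.pyGetD b x []) y v)

def directionsP : List (Int × Int) := [(-1, 0), (0, 1), (1, 0), (0, -1)]

-- 'for j in range(1, dist): … else: break' along one direction (pos recomputed each step)
def crossRun (n s0 s1 d0 d1 : Int) : List Int → List (List Int) → List (List Int)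
  | [], b => b
  | j :: rest, b =>
    let p0 := s0 + d0 * j
    let p1 := s1 + d1 * j
    if 0 ≤ p0 ∧ p0 < n ∧ 0 ≤ p1 ∧ p1 < n then
      crossRun n s0 s1 d0 d1 rest (setI b p0 p1 0)
    else b

-- one step of A's inner loop: 'if board[i+1][j] == 0: swap board[i][j], board[i+1][j]'
def bubStep (j : Nat) (b : List (List Int)) (i : Nat) : List (List Int) :=
  if getCell b (i + 1) j == 0 then
    setCell (setCell b i j (getCell b (i + 1) j)) (i + 1) j (getCell b i j)
  else b

def realignA (b : List (List Int)) (n : Int) : List (List Int) :=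
  (List.range n.toNat).foldl (fun b j =>
    ((List.range (n.toNat - 1)).reverse).foldl (bubStep j) b) b

def explode (board : List (List Int)) (n : Int) (start : List Int) : List (List Int) :=
  match PySem.List.pyGet? start 0, PySem.List.pyGet? start 1 with
  | some s0, some s1 =>
    let dist := getI board s0 s1
    let b1 := setI board s0 s1 0
    let b2 := directionsP.foldl (fun b d =>
      crossRun n s0 s1 d.1 d.2 (PySem.List.pyRange 1 dist 1) b) b1
    realignA b2 n
  | _, _ => board

-- ===== PORT B =====
-- 'while step < dist and 0 <= x < n and 0 <= y < n: board[x][y] = 0; advance' — the fuel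
-- counts the remaining iterations permitted by 'step < dist'
def rayZero (n d0 d1 : Int) : Nat → Int → Int → List (List Int) → List (List Int)
  | 0, _, _, b => b
  | fuel + 1, x, y, b =>
    if 0 ≤ x ∧ x < n ∧ 0 ≤ y ∧ y < n then
      rayZero n d0 d1 fuel (x + d0) (y + d1) (setI b x y 0)
    else b

-- one column of B's realign, one helper per Python statement:
-- 'col = [board[i][j] for i in range(n)]'
def colExtract (b : List (List Int)) (N j : Nat) : List Int :=
  (List.range N).map (fun i => getCell b i j)
-- 'k = -1; for i in range(n): if col[i] == 0: k = max(k, i)'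
def lowZ (c : List Int) (N : Nat) : Int :=
  (List.range N).foldl (fun acc i => if c.getD i 0 == 0 then max acc (i : Int) else acc) (-1)
-- 'new = [0] + col[:k] + col[k+1:]'
def rebuilt (c : List Int) (k : Nat) : List Int := 0 :: (c.take k ++ c.drop (k + 1))
-- 'for i in range(n): board[i][j] = new[i]'
def writeCol (b : List (List Int)) (N j : Nat) (nc : List Int) : List (List Int) :=
  (List.range N).foldl (fun b i => setCell b i j (nc.getD i 0)) b

def settleCol (b : List (List Int)) (N j : Nat) : List (List Int) :=
  if 0 ≤ lowZ (colExtract b N j) N then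
    writeCol b N j (rebuilt (colExtract b N j) (lowZ (colExtract b N j) N).toNat)
  else b

def realignB (b : List (List Int)) (n : Int) : List (List Int) :=
  (List.range n.toNat).foldl (fun b j => settleCol b n.toNat j) b

def explode_alt (board : List (List Int)) (n : Int) (start : List Int) : List (List Int) :=
  match PySem.List.pyGet? start 0 with
  | none => board
  | some s0 =>
    match PySem.List.pyGet? start 1 with
    | none => board
    | some s1 =>
      let dist := getI board s0 s1
      let b1 := setI board s0 s1 0
      let b2 := [((-1 : Int), (0 : Int)), (0, 1), (1, 0), (0, -1)].foldl
        (fun b d => rayZero n d.1 d.2 (dist - 1).toNat (s0 + d.1) (s1 + d.2) b) b1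
      realignB b2 n

-- ===== PRECONDITION & SPEC =====
-- Pre_ excludes ragged boards whose first n rows are not all of length ≥ n even though A can
-- occasionally return on such boards (when no access ever reaches a short row): B's column scan
-- reads board[i][j] for all i < n and raises IndexError there (see the cite in claim.json).
def startIdxOk (board : List (List Int)) (start : List Int) : Bool :=
  match PySem.List.pyGet? board (start.getD 0 0) with
  | none => false
  | some row => (PySem.List.pyGet? row (start.getD 1 0)).isSome

def Pre_explode (board : List (List Int)) (n : Int) (start : List Int) : Prop :=
  2 ≤ start.length ∧ startIdxOk board start = true ∧
  (n ≤ 0 ∨ (n ≤ (board.length : Int) ∧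
    ∀ i ∈ List.range n.toNat, n ≤ ((board.getD i []).length : Int)))

instance (board : List (List Int)) (n : Int) (start : List Int) : Decidable (Pre_explode board n start) := by
  unfold Pre_explode; infer_instance

def pvWitness_explode : List (List Int) × Int × List Int := ([[1, 2], [3, 4]], 2, [0, 0])

def Spec_explode (board : List (List Int)) (n : Int) (start : List Int) (out : List (List Int)) : Prop := out = explode_alt board n start
instance (board : List (List Int)) (n : Int) (start : List Int) (out : List (List Int)) : Decidable (Spec_explode board n start out) := by unfold Spec_explode; infer_instance

-- ===== CLAIM (what is proved, stated in full; the proofs are below) =====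
def Claim_equal_explode : Prop := ∀ (board : List (List Int)) (n : Int) (start : List Int), Dom_explode board n start → Pre_explode board n start → Spec_explode board n start (explode board n start)

-- ===== LEMMAS AND PROOFS =====

-- row lengths and columns of a board
def mapLen (b : List (List Int)) : List Nat := b.map List.length
def col (b : List (List Int)) (j : Nat) : List Int := b.map (fun r => r.getD j 0)

-- the first n rows all have length ≥ n, and there are at least n rows
def shapeOK (b : List (List Int)) (N : Nat) : Prop :=
  N ≤ b.length ∧ ∀ i, i < N → N ≤ (b.getD i []).length

theorem getD_set_ne (r : List Int) (j j' : Nat) (v : Int) (hne : j' ≠ j) :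
    (r.set j v)[j']?.getD 0 = r[j']?.getD 0 := by
  rw [List.getElem?_set_ne (by omega : j ≠ j')]

theorem getD_set_self (r : List Int) (j : Nat) (v : Int) (hj : j < r.length) :
    (r.set j v)[j]?.getD 0 = v := by
  rw [List.getElem?_set_self hj]; rfl

theorem setCell_cons_zero (r : List Int) (t : List (List Int)) (j : Nat) (v : Int) :
    setCell (r :: t) 0 j v = r.set j v :: t := by simp [setCell]

theorem setCell_cons_succ (r : List Int) (t : List (List Int)) (m j : Nat) (v : Int) :
    setCell (r :: t) (m + 1) j v = r :: setCell t m j v := by simp [setCell]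

theorem row_ext (r1 r2 : List Int) (hl : r1.length = r2.length)
    (h : ∀ j, r1.getD j 0 = r2.getD j 0) : r1 = r2 := by
  induction r1 generalizing r2 with
  | nil => cases r2 with | nil => rfl | cons => simp at hl
  | cons a t ih =>
    cases r2 with
    | nil => simp at hl
    | cons a2 t2 =>
      have h0 := h 0
      simp only [List.getD_cons_zero] at h0
      have ht : t = t2 := ih t2 (by simpa using hl)
        (fun j => by simpa [List.getD_cons_succ] using h (j + 1))
      rw [h0, ht]

theorem board_ext (b1 b2 : List (List Int)) (hl : mapLen b1 = mapLen b2)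
    (h : ∀ j, col b1 j = col b2 j) : b1 = b2 := by
  induction b1 generalizing b2 with
  | nil => cases b2 with | nil => rfl | cons => simp [mapLen] at hl
  | cons r t ih =>
    cases b2 with
    | nil => simp [mapLen] at hl
    | cons r2 t2 =>
      simp only [mapLen, List.map_cons, List.cons.injEq] at hl
      have hcols : ∀ j, r.getD j 0 = r2.getD j 0 ∧ col t j = col t2 j := by
        intro j; have := h j; simpa [col, List.cons.injEq] using this
      have hr : r = r2 := row_ext r r2 hl.1 (fun j => (hcols j).1)
      rw [hr, ih t2 hl.2 (fun j => (hcols j).2)]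

theorem getCell_col (b : List (List Int)) (i j : Nat) : getCell b i j = (col b j).getD i 0 := by
  induction b generalizing i with
  | nil => simp [getCell, col, List.getD]
  | cons r t ih =>
    cases i with
    | zero => simp [getCell, col, List.getD]
    | succ m => simpa [getCell, col, List.getD] using ih m

theorem mapLen_setCell (b : List (List Int)) (i j : Nat) (v : Int) :
    mapLen (setCell b i j v) = mapLen b := by
  induction b generalizing i with
  | nil => simp [setCell]
  | cons r t ih =>
    cases i with
    | zero => simp [setCell_cons_zero, mapLen]
    | succ m => simpa [setCell_cons_succ, mapLen] using ih m

theorem col_setCell_ne (b : List (List Int)) (i j j' : Nat) (v : Int) (hne : j' ≠ j) :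
    col (setCell b i j v) j' = col b j' := by
  induction b generalizing i with
  | nil => simp [setCell]
  | cons r t ih =>
    cases i with
    | zero => simp [setCell_cons_zero, col, getD_set_ne r j j' v hne]
    | succ m => simpa [setCell_cons_succ, col] using ih m

theorem col_setCell_self (b : List (List Int)) (i j : Nat) (v : Int)
    (hi : i < b.length) (hj : j < (b.getD i []).length) :
    col (setCell b i j v) j = (col b j).set i v := by
  induction b generalizing i with
  | nil => simp at hi
  | cons r t ih =>
    cases i with
    | zero =>
      simp only [List.getD_cons_zero] at hj
      simp [setCell_cons_zero, col, getD_set_self r j v hj]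
    | succ m =>
      simp only [List.getD_cons_succ] at hj
      simp only [List.length_cons, Nat.succ_lt_succ_iff] at hi
      simp only [setCell_cons_succ, col, List.map_cons, List.set_cons_succ]
      exact congrArg _ (ih m hi hj)

theorem length_col (b : List (List Int)) (j : Nat) : (col b j).length = b.length := by
  simp [col]

theorem length_mapLen (b : List (List Int)) : (mapLen b).length = b.length := by simp [mapLen]

theorem getD_mapLen (b : List (List Int)) (i : Nat) :
    (mapLen b).getD i 0 = (b.getD i []).length := by
  induction b generalizing i with
  | nil => simp [mapLen, List.getD]
  | cons r t ih =>
    cases i with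
    | zero => simp [mapLen, List.getD]
    | succ m => simpa [mapLen, List.getD_cons_succ] using ih m

theorem shapeOK_congr (b1 b2 : List (List Int)) (N : Nat) (hl : mapLen b1 = mapLen b2)
    (h : shapeOK b2 N) : shapeOK b1 N := by
  obtain ⟨h1, h2⟩ := h
  have hlen : b1.length = b2.length := by
    rw [← length_mapLen, hl, length_mapLen]
  refine ⟨by omega, fun i hi => ?_⟩
  have := h2 i hi
  rw [← getD_mapLen, hl, getD_mapLen] at *
  omega

-- ---- column-level version of A's inner loop ----

def stepC (c : List Int) (i : Nat) : List Int :=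
  if c.getD (i + 1) 0 == 0 then (c.set i (c.getD (i + 1) 0)).set (i + 1) (c.getD i 0) else c

def lowFind (c : List Int) (m : Nat) : Option Nat :=
  ((List.range' 1 m).reverse).find? (fun i => c.getD i 0 == 0)

theorem take_set_of_le {α : Type} (c : List α) (i n : Nat) (v : α) (h : n ≤ i) :
    (c.set i v).take n = c.take n := by
  induction c generalizing i n with
  | nil => simp
  | cons a t ih =>
    cases i with
    | zero => cases n with | zero => simp | succ => omega
    | succ m =>
      cases n with
      | zero => simp
      | succ p => simp [List.set_cons_succ, ih m p (by omega)]

theorem drop_set_of_lt {α : Type} (c : List α) (i n : Nat) (v : α) (h : i < n) :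
    (c.set i v).drop n = c.drop n := by
  induction c generalizing i n with
  | nil => simp
  | cons a t ih =>
    cases i with
    | zero => cases n with | zero => omega | succ p => simp
    | succ m =>
      cases n with
      | zero => omega
      | succ p => simp [List.set_cons_succ, ih m p (by omega)]

theorem drop_set_self {α : Type} (c : List α) (i : Nat) (v : α) (h : i < c.length) :
    (c.set i v).drop i = v :: c.drop (i + 1) := by
  induction c generalizing i with
  | nil => simp at h
  | cons a t ih =>
    cases i with
    | zero => simp
    | succ m => simpa [List.set_cons_succ] using ih m (by simpa using h)

theorem take_succ_getD (c : List Int) (k : Nat) (h : k < c.length) :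
    c.take (k + 1) = c.take k ++ [c.getD k 0] := by
  rw [List.take_add_one]
  congr 1
  rw [List.getElem?_eq_getElem h]
  simp [List.getD, List.getElem?_eq_getElem h]

theorem bub_char (m : Nat) (c : List Int) (h : m < c.length) :
    ((List.range m).reverse).foldl stepC c =
      (match lowFind c m with
       | none => c
       | some k => 0 :: c.take k ++ c.drop (k + 1)) := by
  induction m generalizing c with
  | zero => simp [lowFind]
  | succ m ih =>
    rw [show (List.range (m + 1)).reverse = m :: (List.range m).reverse by
      rw [List.range_succ]; simp]
    rw [List.foldl_cons]
    have hfind : (List.range' 1 (m + 1)).reverse = (m + 1) :: (List.range' 1 m).reverse := by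
      rw [List.range'_concat]; simp [Nat.one_add]
    by_cases h0 : c.getD (m + 1) 0 = 0
    · rw [List.getD_eq_getElem?_getD] at h0
      have hstep : stepC c m = (c.set m 0).set (m + 1) (c.getD m 0) := by
        simp [stepC, List.getD_eq_getElem?_getD, h0]
      rw [hstep]
      have hlen2 : ((c.set m 0).set (m + 1) (c.getD m 0)).length = c.length := by simp
      rw [ih _ (by omega)]
      cases m with
      | zero =>
        match c, h with
        | a :: b :: t, _ =>
          have hb : b = 0 := by simpa using h0
          subst hb
          simp [lowFind, List.range']
      | succ p =>
        have hp1 : p + 1 < c.length := by omega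
        have hz : ((c.set (p + 1) 0)[p + 1]?).getD 0 = (0 : Int) := by
          rw [List.getElem?_set_self hp1]; rfl
        rw [show lowFind ((c.set (p + 1) 0).set (p + 2) (c.getD (p + 1) 0)) (p + 1) =
            some (p + 1) by
          unfold lowFind
          rw [show (List.range' 1 (p + 1)).reverse = (p + 1) :: (List.range' 1 p).reverse by
            rw [List.range'_concat]; simp [Nat.one_add]]
          simp [hz]]
        rw [show lowFind c (p + 1 + 1) = some (p + 2) by
          unfold lowFind
          rw [hfind]
          simp [h0]]
        have ht1 : ((c.set (p + 1) 0).set (p + 2) (c.getD (p + 1) 0)).take (p + 1) =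
            c.take (p + 1) := by
          rw [take_set_of_le _ (p + 2) (p + 1) _ (by omega),
            take_set_of_le _ (p + 1) (p + 1) _ (by omega)]
        have ht2 : ((c.set (p + 1) 0).set (p + 2) (c.getD (p + 1) 0)).drop (p + 2) =
            c.getD (p + 1) 0 :: c.drop (p + 3) := by
          rw [drop_set_self _ (p + 2) _ (by simpa using h)]
          rw [drop_set_of_lt _ (p + 1) (p + 3) _ (by omega)]
        rw [show p + 1 + 1 = p + 2 from by omega]
        show (0 : Int) :: List.take (p + 1) _ ++ List.drop (p + 2) _ =
          (0 : Int) :: List.take (p + 2) _ ++ List.drop (p + 3) _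
        rw [ht1, ht2, take_succ_getD c (p + 1) (by omega)]
        simp
    · have h0f : (c.getD (m + 1) 0 == 0) = false := by simpa using h0
      rw [List.getD_eq_getElem?_getD] at h0f
      have hstep : stepC c m = c := by
        simp only [stepC]
        rw [if_neg (by simpa using h0)]
      rw [hstep, ih c (by omega)]
      unfold lowFind
      rw [hfind]
      simp [h0f]

-- full characterisation of A's bubble pass on one column
theorem colAB (N : Nat) (c : List Int) (h : N ≤ c.length) :
    ((List.range (N - 1)).reverse).foldl stepC c =
      (match ((List.range N).reverse).find? (fun i => c.getD i 0 == 0) with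
       | none => c
       | some k => 0 :: c.take k ++ c.drop (k + 1)) := by
  cases N with
  | zero => simp
  | succ M =>
    have hmap : (List.range M).map Nat.succ = List.range' 1 M := by
      rw [List.range'_eq_map_range]
      exact List.map_congr_left (fun x _ => by omega)
    have hsplit : (List.range (M + 1)).reverse = (List.range' 1 M).reverse ++ [0] := by
      rw [List.range_succ_eq_map, ← hmap]
      simp
    rw [show M + 1 - 1 = M by omega, bub_char M c (by omega), hsplit, List.find?_append]
    cases hf : lowFind c M with
    | some k =>
      have hk : k ∈ (List.range' 1 M).reverse := List.mem_of_find?_eq_some hf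
      have hkM : 1 ≤ k ∧ k < 1 + M := by
        simpa [List.mem_range'_1] using (List.mem_reverse.mp hk)
      rw [show ((List.range' 1 M).reverse).find? (fun i => c.getD i 0 == 0) = some k from hf]
      simp
    | none =>
      rw [show ((List.range' 1 M).reverse).find? (fun i => c.getD i 0 == 0) = none from hf]
      simp only [Option.none_or]
      by_cases h0 : c.getD 0 0 = 0
      · cases c with
        | nil => simp at h
        | cons a t =>
          have ha : a = 0 := by simpa [List.getD] using h0
          subst ha
          simp
      · have h0f : (c.getD 0 0 == 0) = false := by simpa using h0
        rw [List.getD_eq_getElem?_getD] at h0f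
        simp [h0f]

-- ---- a generic lift of a per-column loop to the board ----

theorem liftFold (N j : Nat) (stepB : List (List Int) → Nat → List (List Int))
    (stepc : List Int → Nat → List Int) (L : List Nat)
    (hstep : ∀ b i, i ∈ L → shapeOK b N →
      mapLen (stepB b i) = mapLen b ∧ col (stepB b i) j = stepc (col b j) i ∧
        ∀ j', j' ≠ j → col (stepB b i) j' = col b j') :
    ∀ (b : List (List Int)), shapeOK b N →
      mapLen (L.foldl stepB b) = mapLen b ∧
        col (L.foldl stepB b) j = L.foldl stepc (col b j) ∧
        ∀ j', j' ≠ j → col (L.foldl stepB b) j' = col b j' := by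
  induction L with
  | nil => exact fun b _ => ⟨rfl, rfl, fun _ _ => rfl⟩
  | cons i L ih =>
    intro b hs
    have h1 := hstep b i (by simp) hs
    have hs' : shapeOK (stepB b i) N := shapeOK_congr _ _ _ h1.1 hs
    have hrec := ih (fun b i hi => hstep b i (by simp [hi])) (stepB b i) hs'
    refine ⟨by rw [List.foldl_cons, hrec.1, h1.1], ?_, ?_⟩
    · rw [List.foldl_cons, List.foldl_cons, hrec.2.1, h1.2.1]
    · intro j' hne
      rw [List.foldl_cons, hrec.2.2 j' hne, h1.2.2 j' hne]

theorem bubStep_facts (N j i : Nat) (b : List (List Int)) (hj : j < N) (hiN : i + 1 < N)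
    (hs : shapeOK b N) :
    mapLen (bubStep j b i) = mapLen b ∧ col (bubStep j b i) j = stepC (col b j) i ∧
      ∀ j', j' ≠ j → col (bubStep j b i) j' = col b j' := by
  obtain ⟨hlen, hrows⟩ := hs
  have hi1 : i + 1 < b.length := by omega
  have hi : i < b.length := by omega
  have hji : j < (b.getD i []).length := lt_of_lt_of_le hj (hrows i (by omega))
  have hji1 : j < (b.getD (i + 1) []).length := lt_of_lt_of_le hj (hrows (i + 1) (by omega))
  unfold bubStep stepC
  rw [getCell_col b (i + 1) j, getCell_col b i j]
  by_cases h0 : (col b j).getD (i + 1) 0 == 0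
  · rw [if_pos h0, if_pos h0]
    set b1 := setCell b i j ((col b j).getD (i + 1) 0) with hb1
    have hml1 : mapLen b1 = mapLen b := mapLen_setCell ..
    have hlen1 : b1.length = b.length := by
      rw [← length_mapLen, hml1, length_mapLen]
    have hrow1 : j < (b1.getD (i + 1) []).length := by
      rw [← getD_mapLen, hml1, getD_mapLen]; exact hji1
    refine ⟨by rw [mapLen_setCell, hml1], ?_, ?_⟩
    · rw [col_setCell_self b1 (i + 1) j _ (by omega) hrow1,
        hb1, col_setCell_self b i j _ hi hji]
    · intro j' hne
      rw [col_setCell_ne _ _ _ _ _ hne, hb1, col_setCell_ne _ _ _ _ _ hne]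
  · rw [if_neg (by simpa using h0), if_neg (by simpa using h0)]
    exact ⟨rfl, rfl, fun _ _ => rfl⟩

-- ---- B's column body, characterised ----

theorem find?_congr_mem {α : Type} (p q : α → Bool) (l : List α)
    (h : ∀ a ∈ l, p a = q a) : l.find? p = l.find? q := by
  induction l with
  | nil => rfl
  | cons a t ih =>
    simp only [List.find?_cons]
    rw [h a (by simp)]
    cases q a with
    | true => rfl
    | false => exact ih (fun x hx => h x (by simp [hx]))

-- extracted column = first N entries of the full column
theorem mapRange_getCell (b : List (List Int)) (N j : Nat) (h : N ≤ b.length) :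
    (List.range N).map (fun i => getCell b i j) = (col b j).take N := by
  apply List.ext_getElem
  · simp [length_col]; omega
  · intro i h1 h2
    have hiN : i < N := by simpa using h1
    have hic : i < (col b j).length := by rw [length_col]; omega
    simp only [List.getElem_map, List.getElem_range, List.getElem_take]
    rw [getCell_col, List.getD_eq_getElem?_getD, List.getElem?_eq_getElem hic]
    rfl

-- the max-accumulator fold computes the last zero position of the scanned range
theorem foldMax_char (p : Nat → Bool) (N : Nat) :
    (List.range N).foldl (fun acc i => if p i then max acc (i : Int) else acc) (-1) =
      (match ((List.range N).reverse).find? p with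
       | none => (-1 : Int)
       | some k => (k : Int)) := by
  induction N with
  | zero => simp
  | succ N ih =>
    rw [List.range_succ, List.foldl_append, List.foldl_cons, List.foldl_nil, ih,
      List.reverse_append]
    simp only [List.reverse_singleton, List.singleton_append, List.find?_cons]
    cases hp : p N with
    | false => simp
    | true =>
      cases hf : ((List.range N).reverse).find? p with
      | none =>
        norm_num
      | some k =>
        have hk : k < N := by
          have := List.mem_of_find?_eq_some hf
          have := List.mem_reverse.mp this
          exact List.mem_range.mp this
        simp
        omega

-- the write-back fold overwrites the first N entries of the column with nc
theorem writeFold_char (N : Nat) (nc c : List Int) (hN : N ≤ c.length) (hnc : N ≤ nc.length) :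
    (List.range N).foldl (fun c i => c.set i (nc.getD i 0)) c = nc.take N ++ c.drop N := by
  induction N with
  | zero => simp
  | succ N ih =>
    rw [List.range_succ, List.foldl_append, List.foldl_cons, List.foldl_nil,
      ih (by omega) (by omega)]
    have hdrop : c.drop N = c.getD N 0 :: c.drop (N + 1) := by
      rw [List.getD_eq_getElem?_getD, List.getElem?_eq_getElem (by omega : N < c.length)]
      exact (List.drop_eq_getElem_cons (by omega)).trans rfl
    have hlt : (nc.take N).length = N := by
      rw [List.length_take]
      omega
    rw [hdrop, take_succ_getD nc N (by omega)]
    rw [List.set_append, if_neg (by rw [hlt]; omega), hlt]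
    simp

theorem writeStep_facts (N j i : Nat) (nc : List Int) (b : List (List Int))
    (hj : j < N) (hiN : i < N) (hs : shapeOK b N) :
    mapLen (setCell b i j (nc.getD i 0)) = mapLen b ∧
      col (setCell b i j (nc.getD i 0)) j = (col b j).set i (nc.getD i 0) ∧
        ∀ j', j' ≠ j → col (setCell b i j (nc.getD i 0)) j' = col b j' := by
  obtain ⟨hlen, hrows⟩ := hs
  exact ⟨mapLen_setCell .., col_setCell_self b i j _ (by omega)
      (lt_of_lt_of_le hj (hrows i hiN)),
    fun j' hne => col_setCell_ne _ _ _ _ _ hne⟩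

-- per column, A's bubble pass equals B's settleCol
theorem inner_eq (N j : Nat) (hj : j < N) (b : List (List Int)) (hs : shapeOK b N) :
    ((List.range (N - 1)).reverse).foldl (bubStep j) b = settleCol b N j := by
  have hNb : N ≤ b.length := hs.1
  have hA := liftFold N j (bubStep j) stepC ((List.range (N - 1)).reverse)
    (fun b i hi hsb => bubStep_facts N j i b hj
      (by have := List.mem_range.mp (List.mem_reverse.mp hi); omega) hsb) b hs
  have hcharA := colAB N (col b j) (by rw [length_col]; exact hNb)
  have hc : (List.range N).map (fun i => getCell b i j) = (col b j).take N :=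
    mapRange_getCell b N j hNb
  -- the predicate on the truncated column agrees with the one on the full column below N
  have hpred : ∀ i, i < N → (((col b j).take N).getD i 0 == 0) = ((col b j).getD i 0 == 0) := by
    intro i hi
    congr 1
    rw [List.getD_eq_getElem?_getD, List.getD_eq_getElem?_getD, List.getElem?_take_of_lt hi]
  have hfind_eq : ((List.range N).reverse).find? (fun i => ((col b j).take N).getD i 0 == 0) =
      ((List.range N).reverse).find? (fun i => (col b j).getD i 0 == 0) := by
    apply find?_congr_mem
    intro i hi
    exact hpred i (List.mem_range.mp (List.mem_reverse.mp hi))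
  unfold settleCol lowZ colExtract rebuilt writeCol
  rw [hc]
  rw [foldMax_char (fun i => ((col b j).take N).getD i 0 == 0) N, hfind_eq]
  cases hf : ((List.range N).reverse).find? (fun i => (col b j).getD i 0 == 0) with
  | none =>
    rw [hf] at hcharA
    simp only [if_neg (by norm_num : ¬ (0 : Int) ≤ -1)]
    exact board_ext _ _ hA.1 (fun j' => by
      by_cases hne : j' = j
      · subst hne; rw [hA.2.1, hcharA]
      · exact hA.2.2 j' hne)
  | some k =>
    have hkN : k < N := by
      have := List.mem_of_find?_eq_some hf
      have := List.mem_reverse.mp this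
      exact List.mem_range.mp this
    rw [hf] at hcharA
    simp only [if_pos (by positivity : (0 : Int) ≤ (k : Int)), Int.toNat_natCast]
    set cN := (col b j).take N with hcN
    have hlenc : (col b j).length = b.length := length_col ..
    have hlencN : cN.length = N := by rw [hcN]; simp; omega
    set nc := (0 : Int) :: (cN.take k ++ cN.drop (k + 1)) with hnc
    have hlnc : nc.length = N := by
      rw [hnc]
      simp [hlencN]
      omega
    have hB := liftFold N j (fun b i => setCell b i j (nc.getD i 0))
      (fun c i => c.set i (nc.getD i 0)) (List.range N)
      (fun b i hi hsb => writeStep_facts N j i nc b hj (List.mem_range.mp hi) hsb) b hs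
    apply board_ext
    · rw [hA.1, hB.1]
    · intro j'
      by_cases hne : j' = j
      · subst hne
        rw [hA.2.1, hcharA, hB.2.1,
          writeFold_char N nc (col b j') (by omega) (by omega)]
        rw [List.take_of_length_le (by omega)]
        -- 0 :: (cN.take k ++ cN.drop (k+1)) ++ c.drop N = 0 :: c.take k ++ c.drop (k+1)
        rw [hnc, hcN]
        have h1 : ((col b j').take N).take k = (col b j').take k := by
          rw [List.take_take]; congr 1; omega
        have h2 : ((col b j').take N).drop (k + 1) =
            ((col b j').drop (k + 1)).take (N - (k + 1)) := List.drop_take ..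
        have h3 : (col b j').drop N = ((col b j').drop (k + 1)).drop (N - (k + 1)) := by
          rw [List.drop_drop]; congr 1; omega
        rw [h1, h2, h3]
        simp
      · rw [hA.2.2 j' hne, hB.2.2 j' hne]

-- A's realign equals B's realign on well-shaped boards
theorem realign_fold_eq (N : Nat) (L : List Nat) :
    ∀ b : List (List Int), (∀ j ∈ L, j < N) → shapeOK b N →
      L.foldl (fun b j => ((List.range (N - 1)).reverse).foldl (bubStep j) b) b =
        L.foldl (fun b j => settleCol b N j) b := by
  induction L with
  | nil => exact fun _ _ _ => rfl
  | cons j L ih =>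
    intro b hmem hs
    have hj : j < N := hmem j (by simp)
    have hA := liftFold N j (bubStep j) stepC ((List.range (N - 1)).reverse)
      (fun b i hi hsb => bubStep_facts N j i b hj
        (by have := List.mem_range.mp (List.mem_reverse.mp hi); omega) hsb) b hs
    have hs' : shapeOK (((List.range (N - 1)).reverse).foldl (bubStep j) b) N :=
      shapeOK_congr _ _ _ hA.1 hs
    rw [List.foldl_cons, List.foldl_cons,
      ih _ (fun x hx => hmem x (by simp [hx])) hs', inner_eq N j hj b hs]

theorem realign_eq (b : List (List Int)) (n : Int) (hs : shapeOK b n.toNat) :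
    realignA b n = realignB b n := by
  unfold realignA realignB
  exact realign_fold_eq n.toNat (List.range n.toNat) b
    (fun j hj => List.mem_range.mp hj) hs

-- ---- the cross loops agree (recomputed position vs advancing cursor) ----

theorem cross_ray (n s0 s1 d0 d1 dist : Int) (fuel : Nat) :
    ∀ (j : Int) (b : List (List Int)), fuel = (dist - j).toNat →
      crossRun n s0 s1 d0 d1 (PySem.List.pyRange j dist 1) b =
        rayZero n d0 d1 fuel (s0 + d0 * j) (s1 + d1 * j) b := by
  induction fuel with
  | zero =>
    intro j b hf
    have hj : dist ≤ j := by omega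
    rw [PySem.List.pyRange_one_eq_nil hj]
    rfl
  | succ fuel ih =>
    intro j b hf
    have hj : j < dist := by omega
    rw [PySem.List.pyRange_one_cons hj]
    show (if 0 ≤ s0 + d0 * j ∧ s0 + d0 * j < n ∧ 0 ≤ s1 + d1 * j ∧ s1 + d1 * j < n then
        crossRun n s0 s1 d0 d1 (PySem.List.pyRange (j + 1) dist 1)
          (setI b (s0 + d0 * j) (s1 + d1 * j) 0)
      else b) = _
    unfold rayZero
    split
    · rw [ih (j + 1) _ (by omega)]
      ring_nf
    · rfl

theorem cross_ray_one (n s0 s1 d0 d1 dist : Int) (b : List (List Int)) :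
    crossRun n s0 s1 d0 d1 (PySem.List.pyRange 1 dist 1) b =
      rayZero n d0 d1 (dist - 1).toNat (s0 + d0) (s1 + d1) b := by
  have := cross_ray n s0 s1 d0 d1 dist (dist - 1).toNat 1 b rfl
  simpa using this

-- ---- the shared prefix (cross zeroing) preserves row lengths ----

theorem pyIdx?_lt (nn : Nat) (i : Int) (k : Nat) (h : PySem.List.pyIdx? nn i = some k) :
    k < nn := by
  unfold PySem.List.pyIdx? at h
  split at h <;> split at h <;> simp_all <;> omega

theorem set_getD_self_nat (l : List Nat) (k : Nat) (h : k < l.length) :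
    l.set k (l.getD k 0) = l := by
  induction l generalizing k with
  | nil => simp at h
  | cons a t ih =>
    cases k with
    | zero => simp [List.getD]
    | succ m => simpa [List.getD_cons_succ] using ih m (by simpa using h)

theorem length_pySetD (xs : List Int) (y : Int) (v : Int) :
    (PySem.List.pySetD xs y v).length = xs.length := by
  unfold PySem.List.pySetD PySem.List.pySet?
  cases hk : PySem.List.pyIdx? xs.length y <;> simp

theorem mapLen_setI (b : List (List Int)) (x y : Int) (v : Int) :
    mapLen (setI b x y v) = mapLen b := by
  have hr : (PySem.List.pySetD (PySem.List.pyGetD b x []) y v).length =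
      (PySem.List.pyGetD b x []).length := length_pySetD ..
  unfold setI
  generalize hR : PySem.List.pySetD (PySem.List.pyGetD b x []) y v = R at hr ⊢
  unfold PySem.List.pySetD PySem.List.pySet?
  cases hk : PySem.List.pyIdx? b.length x with
  | none => simp
  | some k =>
    have hklt : k < b.length := pyIdx?_lt _ _ _ hk
    have hrow : PySem.List.pyGetD b x [] = b.getD k [] := by
      unfold PySem.List.pyGetD PySem.List.pyGet?
      rw [hk]
      rfl
    simp only [Option.map_some, Option.getD_some, mapLen, List.map_set]
    rw [hr, hrow,
      show (b.getD k []).length = (b.map List.length).getD k 0 from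
        by simpa [mapLen] using (getD_mapLen b k).symm]
    exact set_getD_self_nat (b.map List.length) k (by simpa using hklt)

theorem mapLen_rayZero (n d0 d1 : Int) (fuel : Nat) :
    ∀ (x y : Int) (b : List (List Int)), mapLen (rayZero n d0 d1 fuel x y b) = mapLen b := by
  induction fuel with
  | zero => exact fun _ _ _ => rfl
  | succ fuel ih =>
    intro x y b
    unfold rayZero
    split
    · rw [ih, mapLen_setI]
    · rfl

-- ===== VERDICT (by name: the statement is the Claim_ definition above) =====
theorem explode_spec : Claim_equal_explode := by
  intro board n start _ hpre
  unfold Spec_explode explode explode_alt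
  cases h0 : PySem.List.pyGet? start 0 with
  | none => cases PySem.List.pyGet? start 1 <;> rfl
  | some s0 =>
    cases h1 : PySem.List.pyGet? start 1 with
    | none => rfl
    | some s1 =>
      dsimp only
      set dist := getI board s0 s1 with hdist
      set b1 := setI board s0 s1 0 with hb1
      have hfold : directionsP.foldl (fun b d =>
          crossRun n s0 s1 d.1 d.2 (PySem.List.pyRange 1 dist 1) b) b1 =
          [((-1 : Int), (0 : Int)), (0, 1), (1, 0), (0, -1)].foldl
            (fun b d => rayZero n d.1 d.2 (dist - 1).toNat (s0 + d.1) (s1 + d.2) b) b1 := by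
        simp only [directionsP, List.foldl_cons, List.foldl_nil, cross_ray_one]
      rw [hfold]
      apply realign_eq
      set b2 := [((-1 : Int), (0 : Int)), (0, 1), (1, 0), (0, -1)].foldl
        (fun b d => rayZero n d.1 d.2 (dist - 1).toNat (s0 + d.1) (s1 + d.2) b) b1 with hb2
      have hshape : shapeOK board n.toNat := by
        rcases hpre.2.2 with hn | ⟨hnl, hrows⟩
        · rw [Int.toNat_of_nonpos hn]
          exact ⟨Nat.zero_le _, fun i hi => absurd hi (by omega)⟩
        · refine ⟨by omega, fun i hi => ?_⟩
          have := hrows i (List.mem_range.mpr hi)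
          omega
      apply shapeOK_congr _ board
      · rw [hb2]
        simp only [List.foldl_cons, List.foldl_nil, mapLen_rayZero]
        rw [hb1, mapLen_setI]
      · exact hshape
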